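-- pv_equiv track=rewrite | github.com/MitsudoAI/mcp-style-agent | tests/deep_thinking/test_flow_analyzer_standalone.py | _determine_impact_level
-- ===== SOURCE A (Python) =====
-- def _determine_impact_level(changes):
--     """Determine overall impact level of changes"""
--     if not changes:
--         return "none"
--
--     impact_levels = [change.get("impact", "low") for change in changes]
--
--     if "breaking" in impact_levels:
--         return "breaking"
--     elif "high" in impact_levels:
--         return "high"
--     elif "medium" in impact_levels:
--         return "medium"
--     else:
--         return "low"
-- ===== SOURCE B (Python) =====
-- def _determine_impact_level(changes):
--     """Determine overall impact level of changes"""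
--     if not changes:
--         return "none"
--     rank = {"breaking": 3, "high": 2, "medium": 1, "low": 0}
--     best = 0
--     for change in changes:
--         best = max(best, rank.get(change.get("impact", "low"), 0))
--     return ["low", "medium", "high", "breaking"][best]
-- ===== Notes on version B (the rewrite author's own statement) =====
-- stated objective: simpler
-- what changed: Replaces the build-a-list-of-levels-then-four-membership-scans cascade with a single fold that tracks the maximum severity rank (unknown impacts rank 0) and one table lookup to turn the rank back into its name.
import Mathlib
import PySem

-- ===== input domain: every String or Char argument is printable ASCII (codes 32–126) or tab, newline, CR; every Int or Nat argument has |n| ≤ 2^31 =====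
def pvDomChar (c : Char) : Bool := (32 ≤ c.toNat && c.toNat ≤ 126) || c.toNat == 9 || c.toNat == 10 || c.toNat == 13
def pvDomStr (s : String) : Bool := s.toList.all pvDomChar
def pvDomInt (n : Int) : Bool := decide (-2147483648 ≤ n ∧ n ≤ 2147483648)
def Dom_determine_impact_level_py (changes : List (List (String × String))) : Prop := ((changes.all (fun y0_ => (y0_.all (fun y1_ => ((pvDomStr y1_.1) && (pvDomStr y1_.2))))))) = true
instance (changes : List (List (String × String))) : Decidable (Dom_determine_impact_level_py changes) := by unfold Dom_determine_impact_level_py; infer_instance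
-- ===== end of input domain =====

-- B replaces A's build-the-level-list-then-four-membership-scans with a single max-rank fold
-- and a table lookup (objective: simpler, one pass).


-- ===== PORT A =====
-- dict.get on an association list (first match, per the dict convention); used by both ports
def pvGet (d : List (String × String)) (k dflt : String) : String :=
  match d.find? (fun kv => kv.1 == k) with
  | some kv => kv.2
  | none => dflt

-- Port of A: build the level list, then the four membership scans in order.
def determine_impact_level_py (changes : List (List (String × String))) : String :=
  if changes = [] then "none"
  else
    let impact_levels := changes.map (fun change => pvGet change "impact" "low")
    if impact_levels.contains "breaking" then "breaking"
    else if impact_levels.contains "high" then "high"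
    else if impact_levels.contains "medium" then "medium"
    else "low"

-- ===== PORT B =====
-- Port of B: one fold tracking the maximum severity rank, then a table lookup.
def pvRank : PySem.Dict String Nat := PySem.Dict.ofList [("breaking", 3), ("high", 2), ("medium", 1), ("low", 0)]
def pvNames : List String := ["low", "medium", "high", "breaking"]
def determine_impact_level_py_alt (changes : List (List (String × String))) : String :=
  if changes = [] then "none"
  else
    let best := changes.foldl (fun best change =>
      max best (PySem.Dict.getD pvRank (pvGet change "impact" "low") 0)) 0
    pvNames.getD best ""

-- ===== PRECONDITION & SPEC =====
def Spec_determine_impact_level_py (changes : List (List (String × String))) (out : String) : Prop := out = determine_impact_level_py_alt changes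
instance (changes : List (List (String × String))) (out : String) : Decidable (Spec_determine_impact_level_py changes out) := by unfold Spec_determine_impact_level_py; infer_instance

-- ===== CLAIM (what is proved, stated in full; the proofs are below) =====
def Claim_equal_determine_impact_level_py : Prop := ∀ (changes : List (List (String × String))), Dom_determine_impact_level_py changes → Spec_determine_impact_level_py changes (determine_impact_level_py changes)

-- ===== LEMMAS AND PROOFS =====

-- rank of one change
def pvR (change : List (String × String)) : Nat :=
  PySem.Dict.getD pvRank (pvGet change "impact" "low") 0

lemma rank_eq (s : String) : PySem.Dict.getD pvRank s 0
    = (if s = "breaking" then 3 else if s = "high" then 2 else if s = "medium" then 1 else 0) := by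
  have h : pvRank = PySem.Dict.mk [("breaking", 3), ("high", 2), ("medium", 1), ("low", 0)] := by
    decide
  rw [h]
  simp only [PySem.Dict.getD, PySem.Dict.get?_mk_cons]
  split_ifs with h1 h2 h3 h4 <;> simp_all [PySem.Dict.get?]

lemma foldl_max_init (cs : List (List (String × String))) (b : Nat) :
    cs.foldl (fun best change => max best (pvR change)) b
      = max b (cs.foldl (fun best change => max best (pvR change)) 0) := by
  induction cs generalizing b with
  | nil => simp
  | cons c cs ih =>
    simp only [List.foldl_cons]
    rw [ih (max b (pvR c)), ih (max 0 (pvR c))]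
    simp [Nat.max_assoc]

lemma foldl_char (cs : List (List (String × String))) :
    cs.foldl (fun best change => max best (pvR change)) 0
      = (if (cs.map (fun c => pvGet c "impact" "low")).contains "breaking" then 3
         else if (cs.map (fun c => pvGet c "impact" "low")).contains "high" then 2
         else if (cs.map (fun c => pvGet c "impact" "low")).contains "medium" then 1
         else 0) := by
  induction cs with
  | nil => simp
  | cons c cs ih =>
    simp only [List.foldl_cons, List.map_cons, List.contains_cons]
    rw [foldl_max_init, ih]
    unfold pvR
    rw [rank_eq]
    by_cases hb : pvGet c "impact" "low" = "breaking" <;>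
    by_cases hh : pvGet c "impact" "low" = "high" <;>
    by_cases hm : pvGet c "impact" "low" = "medium" <;>
      simp only [hb, hh, hm, beq_iff_eq, if_true, if_false, Bool.or_eq_true] <;>
      · first
        | (simp [hb, hh, hm] <;> split_ifs <;> omega)
        | (simp [Ne.symm hb, Ne.symm hh, Ne.symm hm] <;> split_ifs <;> omega)

-- ===== VERDICT (by name: the statement is the Claim_ definition above) =====
theorem determine_impact_level_py_spec : Claim_equal_determine_impact_level_py := by
  intro changes _
  unfold Spec_determine_impact_level_py determine_impact_level_py determine_impact_level_py_alt
  by_cases h : changes = []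
  · simp [h]
  · simp only [h, if_false]
    have := foldl_char changes
    simp only [pvR] at this
    rw [this]
    split_ifs <;> simp [pvNames]
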